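-- pv_equiv track=rewrite | github.com/Lucyna-ls/slidepro | SlidePro-Backend/src/app/utils.py | extract_text_count_json
-- ===== SOURCE A (Python) =====
-- def extract_text_count_json(data):
--     texts = []
--
--     # Check if 'shapes' key exists
--     if 'shapes' in data:
--         for shape in data['shapes']:
--             # Check if 'Content' key exists within each shape
--             if 'Content' in shape:
--                 for content_item in shape['Content']:
--                     # Extract 'Text' if present
--                     if 'Text' in content_item:
--                         texts.append(content_item['Text'])
--                     # Extract 'Bullet' if present
--                     if 'Bullet' in content_item and content_item['Bullet'] is not None:
--                         texts.append(content_item['Bullet'])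
--
--     # remove None from list
--     texts = [text for text in texts if text is not None]
--     final_str = ' '.join(texts)
--     return len(final_str)
-- ===== SOURCE B (Python) =====
-- def extract_text_count_json(data):
--     # Recursive decomposition: each level returns a (total_length, piece_count)
--     # pair; dict.get with defaults replaces the membership checks, and the
--     # final length of the space-joined string is total + max(count - 1, 0).
--     total, n = _count_shapes(data.get('shapes', []))
--     return total + max(n - 1, 0)
--
-- def _count_shapes(shapes):
--     if not shapes:
--         return (0, 0)
--     t1, n1 = _count_items(shapes[0].get('Content', []))
--     t2, n2 = _count_shapes(shapes[1:])
--     return (t1 + t2, n1 + n2)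
--
-- def _count_items(items):
--     if not items:
--         return (0, 0)
--     ci = items[0]
--     t, n = 0, 0
--     for v in (ci.get('Text'), ci.get('Bullet')):
--         if v is not None:
--             t += len(v)
--             n += 1
--     t2, n2 = _count_items(items[1:])
--     return (t + t2, n + n2)
-- ===== Notes on version B (the rewrite author's own statement) =====
-- stated objective: alternative
-- what changed: B is a recursive decomposition: helper functions recurse on the shapes and content-item lists, each returning a (total_length, piece_count) pair combined additively; dict.get with defaults replaces the membership tests and no list of texts or joined string is ever built, the answer being total + max(count-1, 0).
import Mathlib
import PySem

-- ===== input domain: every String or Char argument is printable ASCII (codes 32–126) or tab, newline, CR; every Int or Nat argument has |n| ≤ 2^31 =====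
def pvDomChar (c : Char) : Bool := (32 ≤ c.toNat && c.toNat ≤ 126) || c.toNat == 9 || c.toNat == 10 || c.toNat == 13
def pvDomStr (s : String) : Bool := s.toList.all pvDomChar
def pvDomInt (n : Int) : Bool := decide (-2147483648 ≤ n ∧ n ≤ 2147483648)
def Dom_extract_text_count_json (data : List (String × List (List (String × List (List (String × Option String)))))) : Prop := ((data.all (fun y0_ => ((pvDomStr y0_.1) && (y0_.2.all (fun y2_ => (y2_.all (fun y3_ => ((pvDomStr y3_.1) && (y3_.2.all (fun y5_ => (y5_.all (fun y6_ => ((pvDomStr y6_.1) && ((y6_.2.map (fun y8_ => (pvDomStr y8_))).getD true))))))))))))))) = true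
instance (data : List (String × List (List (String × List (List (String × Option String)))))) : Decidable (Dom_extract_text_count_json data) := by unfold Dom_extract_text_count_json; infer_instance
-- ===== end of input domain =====

-- B replaces A's "collect all texts, join with ' ', take len" by a recursive
-- decomposition into helpers returning (total_length, piece_count) pairs;
-- objective: alternative (no intermediate list or joined string is built).

-- ===== PORT A =====
-- first-match association-list lookup: models Python's `k in d` / `d[k]` / `d.get(k)` on a dict
def pvLookup {α : Type} (d : List (String × α)) (k : String) : Option α :=
  match d with
  | [] => none
  | (k', v) :: rest => if k' = k then some v else pvLookup rest k

-- one content item of A's inner loop: the two `if` appends to `texts`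
def pvStepA (acc : List (Option String)) (ci : List (String × Option String)) : List (Option String) :=
  let acc1 := match pvLookup ci "Text" with
    | some t => acc ++ [t]
    | none => acc
  match pvLookup ci "Bullet" with
  | some (some b) => acc1 ++ [some b]
  | _ => acc1

def extract_text_count_json (data : List (String × List (List (String × List (List (String × Option String)))))) : Int :=
  let texts : List (Option String) :=
    match pvLookup data "shapes" with
    | none => []
    | some shapes =>
      shapes.foldl (fun acc shape =>
        match pvLookup shape "Content" with
        | none => acc
        | some content => content.foldl pvStepA acc) []
  -- texts = [text for text in texts if text is not None]
  let texts2 : List String := texts.filterMap id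
  PySem.Str.len (PySem.Str.join " " texts2)

-- ===== PORT B =====
-- _count_items: recursion on the content-item list; the `for v in (ci.get('Text'), ci.get('Bullet'))`
-- loop is a fold over the two-element list of looked-up values (ci.get(k) flattens an absent key
-- and a stored None to none, hence the .getD none)
def pvCountItems : List (List (String × Option String)) → Int × Int
  | [] => (0, 0)
  | ci :: rest =>
    let tn : Int × Int :=
      [(pvLookup ci "Text").getD none, (pvLookup ci "Bullet").getD none].foldl
        (fun tn v => match v with
          | some s => (tn.1 + PySem.Str.len s, tn.2 + 1)
          | none => tn) (0, 0)
    let tn2 := pvCountItems rest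
    (tn.1 + tn2.1, tn.2 + tn2.2)

-- _count_shapes: recursion on the shapes list
def pvCountShapes : List (List (String × List (List (String × Option String)))) → Int × Int
  | [] => (0, 0)
  | shape :: rest =>
    let tn1 := pvCountItems ((pvLookup shape "Content").getD [])
    let tn2 := pvCountShapes rest
    (tn1.1 + tn2.1, tn1.2 + tn2.2)

def extract_text_count_json_alt (data : List (String × List (List (String × List (List (String × Option String)))))) : Int :=
  let tn := pvCountShapes ((pvLookup data "shapes").getD [])
  tn.1 + max (tn.2 - 1) 0

-- ===== PRECONDITION & SPEC =====
def Spec_extract_text_count_json (data : List (String × List (List (String × List (List (String × Option String)))))) (out : Int) : Prop := out = extract_text_count_json_alt data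
instance (data : List (String × List (List (String × List (List (String × Option String)))))) (out : Int) : Decidable (Spec_extract_text_count_json data out) := by unfold Spec_extract_text_count_json; infer_instance

-- ===== CLAIM (what is proved, stated in full; the proofs are below) =====
def Claim_equal_extract_text_count_json : Prop := ∀ (data : List (String × List (List (String × List (List (String × Option String)))))), Dom_extract_text_count_json data → Spec_extract_text_count_json data (extract_text_count_json data)

-- ===== LEMMAS AND PROOFS =====

-- texts contributed by one content item (A's view)
def pvItemTexts (ci : List (String × Option String)) : List (Option String) :=
  (match pvLookup ci "Text" with
   | some t => [t]
   | none => []) ++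
  (match pvLookup ci "Bullet" with
   | some (some b) => [some b]
   | _ => [])

def pvShapeTexts (shape : List (String × List (List (String × Option String)))) : List (Option String) :=
  match pvLookup shape "Content" with
  | none => []
  | some content => content.flatMap pvItemTexts

-- total length / count of the non-None entries
def pvS (ts : List (Option String)) : Int := ((ts.filterMap id).map PySem.Str.len).sum
def pvC (ts : List (Option String)) : Int := ((ts.filterMap id).length : Int)

theorem pvS_append (a b : List (Option String)) : pvS (a ++ b) = pvS a + pvS b := by
  simp [pvS, List.filterMap_append]

theorem pvC_append (a b : List (Option String)) : pvC (a ++ b) = pvC a + pvC b := by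
  simp [pvC, List.filterMap_append]

-- A's inner fold appends exactly pvItemTexts
theorem foldA_inner (content : List (List (String × Option String)))
    (acc : List (Option String)) :
    content.foldl pvStepA acc = acc ++ content.flatMap pvItemTexts := by
  induction content generalizing acc with
  | nil => simp
  | cons ci rest ih =>
    simp only [List.foldl_cons, List.flatMap_cons, ih, pvItemTexts, pvStepA]
    cases pvLookup ci "Text" with
    | none =>
      cases h : pvLookup ci "Bullet" with
      | none => simp
      | some b => cases b <;> simp
    | some t =>
      cases h : pvLookup ci "Bullet" with
      | none => simp
      | some b => cases b <;> simp

theorem foldA_outer (shapes : List (List (String × List (List (String × Option String)))))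
    (acc : List (Option String)) :
    shapes.foldl (fun acc shape =>
      match pvLookup shape "Content" with
      | none => acc
      | some content => content.foldl pvStepA acc) acc
    = acc ++ shapes.flatMap pvShapeTexts := by
  induction shapes generalizing acc with
  | nil => simp
  | cons shape rest ih =>
    simp only [List.foldl_cons, List.flatMap_cons, ih, pvShapeTexts]
    cases pvLookup shape "Content" with
    | none => simp
    | some content => dsimp only; rw [foldA_inner]; simp

-- B's item step computes exactly (pvS, pvC) of pvItemTexts
theorem countItems_item (ci : List (String × Option String)) :
    [(pvLookup ci "Text").getD none, (pvLookup ci "Bullet").getD none].foldl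
      (fun tn v => match v with
        | some s => (tn.1 + PySem.Str.len s, tn.2 + 1)
        | none => tn) ((0 : Int), (0 : Int))
    = (pvS (pvItemTexts ci), pvC (pvItemTexts ci)) := by
  simp only [pvItemTexts]
  cases pvLookup ci "Text" with
  | none =>
    cases h : pvLookup ci "Bullet" with
    | none => simp [pvS, pvC]
    | some b => cases b <;> simp [pvS, pvC]
  | some t =>
    cases t with
    | none =>
      cases h : pvLookup ci "Bullet" with
      | none => simp [pvS, pvC]
      | some b => cases b <;> simp [pvS, pvC]
    | some s =>
      cases h : pvLookup ci "Bullet" with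
      | none => simp [pvS, pvC]
      | some b => cases b <;> simp [pvS, pvC]

theorem countItems_eq (content : List (List (String × Option String))) :
    pvCountItems content
    = (pvS (content.flatMap pvItemTexts), pvC (content.flatMap pvItemTexts)) := by
  induction content with
  | nil => simp [pvCountItems, pvS, pvC]
  | cons ci rest ih =>
    simp only [pvCountItems, List.flatMap_cons, ih, countItems_item, pvS_append, pvC_append]

theorem countShapes_eq (shapes : List (List (String × List (List (String × Option String))))) :
    pvCountShapes shapes
    = (pvS (shapes.flatMap pvShapeTexts), pvC (shapes.flatMap pvShapeTexts)) := by
  induction shapes with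
  | nil => simp [pvCountShapes, pvS, pvC]
  | cons shape rest ih =>
    simp only [pvCountShapes, List.flatMap_cons, ih, pvS_append, pvC_append, pvShapeTexts]
    cases pvLookup shape "Content" with
    | none => simp [countItems_eq, pvS, pvC]
    | some content => simp [countItems_eq]

-- length of the space-joined list of strings
theorem len_join_space (l : List String) :
    PySem.Str.len (PySem.Str.join " " l)
    = (l.map PySem.Str.len).sum + (if (l.length : Int) > 0 then (l.length : Int) - 1 else 0) := by
  induction l with
  | nil =>
    simp [PySem.Str.len_eq, PySem.Str.toList_join, PySem.Chars.join_nil]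
  | cons a t ih =>
    cases t with
    | nil =>
      simp [PySem.Str.len_eq, PySem.Str.toList_join, PySem.Chars.join_singleton]
    | cons b rest =>
      have hj : (PySem.Str.join " " (a :: b :: rest)).toList
          = a.toList ++ " ".toList ++ PySem.Chars.join " ".toList (List.map String.toList (b :: rest)) := by
        rw [PySem.Str.toList_join]
        simp only [List.map_cons]
        rw [PySem.Chars.join_cons_cons]
      have hs : (" ".toList).length = 1 := by decide
      have hlen : PySem.Str.len (PySem.Str.join " " (a :: b :: rest))
          = PySem.Str.len a + 1 + PySem.Str.len (PySem.Str.join " " (b :: rest)) := by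
        simp only [PySem.Str.len_eq, hj, PySem.Str.toList_join, List.length_append, hs]
        push_cast
        ring
      rw [hlen, ih]
      simp only [List.map_cons, List.sum_cons, List.length_cons]
      push_cast
      split_ifs with h1 h2 <;> omega

-- ===== VERDICT (by name: the statement is the Claim_ definition above) =====
theorem extract_text_count_json_spec : Claim_equal_extract_text_count_json := by
  intro data _
  show extract_text_count_json data = extract_text_count_json_alt data
  unfold extract_text_count_json extract_text_count_json_alt
  cases pvLookup data "shapes" with
  | none => simp [pvCountShapes]
  | some shapes =>
    simp only [Option.getD_some]
    rw [foldA_outer, len_join_space, countShapes_eq]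
    have hC : pvC (shapes.flatMap pvShapeTexts)
        = (((shapes.flatMap pvShapeTexts).filterMap id).length : Int) := rfl
    simp only [List.nil_append, pvS, pvC, List.map_filterMap]
    omega
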